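-- pv_equiv track=rewrite | github.com/momentum-sez/stack | tools/mmr.py | _peak_plan
-- ===== SOURCE A (Python) =====
-- from typing import List, Tuple, Dict, Any
--
-- def _peak_plan(size: int) -> List[Tuple[int, int]]:
--     """Return a list of peaks as (height, leaf_count) from left-to-right for a given leaf size."""
--     if size < 0:
--         raise ValueError("size must be >= 0")
--     out: List[Tuple[int, int]] = []
--     n = size
--     while n > 0:
--         # highest power of two <= n
--         h = n.bit_length() - 1
--         cnt = 1 << h
--         out.append((h, cnt))
--         n -= cnt
--     return out
-- ===== SOURCE B (Python) =====
-- from typing import List, Tuple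
--
-- def _peak_plan(size: int) -> List[Tuple[int, int]]:
--     """Return a list of peaks as (height, leaf_count) from left-to-right for a given leaf size."""
--     if size < 0:
--         raise ValueError("size must be >= 0")
--     if size == 0:
--         return []
--     peaks = [(h + 1, 2 * c) for (h, c) in _peak_plan(size // 2)]
--     if size % 2:
--         peaks.append((0, 1))
--     return peaks
-- ===== Notes on version B (the rewrite author's own statement) =====
-- stated objective: alternative
-- what changed: B replaces A's while-loop that strips the highest power of two off a running remainder by a divide-and-conquer recursion on half the size: it recursively gets the plan for size halved, lifts every peak one level higher with a doubled leaf count, and appends the single one-leaf peak when size is odd.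
import Mathlib
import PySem

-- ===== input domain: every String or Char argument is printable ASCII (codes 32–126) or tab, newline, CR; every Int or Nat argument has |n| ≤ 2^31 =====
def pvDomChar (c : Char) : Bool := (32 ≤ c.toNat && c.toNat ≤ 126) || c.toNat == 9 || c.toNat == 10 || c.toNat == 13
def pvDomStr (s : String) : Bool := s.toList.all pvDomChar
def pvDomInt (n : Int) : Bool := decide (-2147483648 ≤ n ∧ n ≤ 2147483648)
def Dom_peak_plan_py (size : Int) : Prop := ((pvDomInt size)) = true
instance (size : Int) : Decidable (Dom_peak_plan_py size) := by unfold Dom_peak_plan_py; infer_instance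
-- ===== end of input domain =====

-- One honest line: B computes the plan by recursion on half the size — lift every peak of the half-size plan one
-- level higher with a doubled leaf count and append the single one-leaf peak when size is odd — instead of A's loop
-- subtracting the top power of two from a running remainder (objective: alternative decomposition).

-- ===== PORT A =====
-- while n > 0: h = n.bit_length() - 1; cnt = 1 << h; out.append((h, cnt)); n -= cnt
def peak_plan_py_loop (n : Int) : List (Int × Int) :=
  if hpos : 0 < n then
    let h : Nat := PySem.Int.bitLength n - 1
    let cnt : Int := 1 <<< h
    ((h : Int), cnt) :: peak_plan_py_loop (n - cnt)
  else []
termination_by n.toNat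
decreasing_by
  have h1 : 2 ^ (PySem.Int.bitLength n - 1) ≤ n.natAbs :=
    PySem.Int.two_pow_bitLength_le n (by omega)
  have h3 : n.natAbs = n.toNat := by omega
  have h2 : (1 : Int) <<< (PySem.Int.bitLength n - 1) = ((2 ^ (PySem.Int.bitLength n - 1) : Nat) : Int) := by
    rw [Int.shiftLeft_eq]; push_cast; ring
  have h4 : (0:Nat) < 2 ^ (PySem.Int.bitLength n - 1) := Nat.pow_pos (by omega)
  have hc : cnt = ((2 ^ (PySem.Int.bitLength n - 1) : Nat) : Int) := h2
  omega

def peak_plan_py (size : Int) : List (Int × Int) :=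
  if size < 0 then []   -- Python raises ValueError here; excluded by Pre_
  else peak_plan_py_loop size

-- ===== PORT B =====
-- if size == 0: []; peaks = [(h+1, 2*c) for (h,c) in _peak_plan(size // 2)]; if size % 2: peaks.append((0,1))
def peak_plan_py_alt (size : Int) : List (Int × Int) :=
  if size < 0 then []   -- Python raises ValueError here; excluded by Pre_
  else if hz : size = 0 then []
  else
    let peaks := (peak_plan_py_alt (PySem.Int.floordiv size 2)).map (fun p => (p.1 + 1, 2 * p.2))
    if PySem.Int.mod size 2 ≠ 0 then peaks ++ [(0, 1)] else peaks
termination_by size.toNat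
decreasing_by
  have hb : (0:Int) < 2 := by omega
  have := PySem.Int.floordiv_eq_ediv_of_pos (a := size) hb
  omega

-- ===== PRECONDITION & SPEC =====
-- A raises ValueError exactly on size < 0; those inputs are excluded.
def Pre_peak_plan_py (size : Int) : Prop := 0 ≤ size
instance (size : Int) : Decidable (Pre_peak_plan_py size) := by unfold Pre_peak_plan_py; infer_instance
def pvWitness_peak_plan_py : Int := (13)

def Spec_peak_plan_py (size : Int) (out : List (Int × Int)) : Prop := out = peak_plan_py_alt size
instance (size : Int) (out : List (Int × Int)) : Decidable (Spec_peak_plan_py size out) := by unfold Spec_peak_plan_py; infer_instance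

-- ===== CLAIM (what is proved, stated in full; the proofs are below) =====
def Claim_equal_peak_plan_py : Prop := ∀ (size : Int), Dom_peak_plan_py size → Pre_peak_plan_py size → Spec_peak_plan_py size (peak_plan_py size)

-- ===== LEMMAS AND PROOFS =====

-- proof-side normal form: the set bits of m at positions k-1 … 0, as (h, 2^h) pairs
def pvBits (m k : Nat) : List (Int × Int) :=
  match k with
  | 0 => []
  | k + 1 => (if m / 2 ^ k % 2 = 1 then [((k : Int), ((2 ^ k : Nat) : Int))] else []) ++ pvBits m k

theorem pvBits_zero (k : Nat) : pvBits 0 k = [] := by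
  induction k with
  | zero => rfl
  | succ k ih => simp [pvBits, ih]

theorem pvBits_congr (m m' k : Nat)
    (hagree : ∀ h : Nat, h < k → m / 2 ^ h % 2 = m' / 2 ^ h % 2) :
    pvBits m k = pvBits m' k := by
  induction k with
  | zero => rfl
  | succ k ih =>
    simp only [pvBits, hagree k (by omega)]
    rw [ih (fun h hh => hagree h (by omega))]

-- bitLength is determined by a power-of-two bracket
theorem bitLength_eq_of_bracket (n : Int) (k : Nat)
    (h1 : 2 ^ k ≤ n.natAbs) (h2 : n.natAbs < 2 ^ (k + 1)) :
    PySem.Int.bitLength n = k + 1 := by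
  have hne : n ≠ 0 := by
    have hp : (0:Nat) < 2 ^ k := Nat.pow_pos (by omega)
    intro h; rw [h] at h1; simp at h1
  have hlo := PySem.Int.two_pow_bitLength_le n hne
  have hhi := PySem.Int.lt_two_pow_bitLength n
  by_contra hneq
  rcases Nat.lt_or_ge (PySem.Int.bitLength n) (k + 1) with hc | hc
  · have : 2 ^ PySem.Int.bitLength n ≤ 2 ^ k := Nat.pow_le_pow_right (by omega) (by omega)
    omega
  · have : 2 ^ (k + 1) ≤ 2 ^ (PySem.Int.bitLength n - 1) := Nat.pow_le_pow_right (by omega) (by omega)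
    omega

-- digit h of 2^k + r agrees with digit h of r, below k
theorem div_mod_add_pow (r k h : Nat) (hl : h < k) :
    (2 ^ k + r) / 2 ^ h % 2 = r / 2 ^ h % 2 := by
  have hsplit : (2:Nat) ^ k = 2 ^ h * 2 ^ (k - h) := by
    rw [← pow_add]; congr 1; omega
  have hdiv : (2 ^ k + r) / 2 ^ h = r / 2 ^ h + 2 ^ (k - h) := by
    rw [hsplit, Nat.add_comm, Nat.add_mul_div_left _ _ (Nat.pow_pos (by omega))]
  have heven : (2:Nat) ^ (k - h) = 2 * 2 ^ (k - h - 1) := by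
    rw [← pow_succ']; congr 1; omega
  rw [hdiv, heven]; omega

-- A's loop computes exactly the set-bit list
theorem loop_eq_bits : ∀ (k m : Nat), m < 2 ^ k →
    peak_plan_py_loop ((m : Nat) : Int) = pvBits m k := by
  intro k
  induction k with
  | zero =>
    intro m hlt
    have hz : m = 0 := by omega
    subst hz
    rw [peak_plan_py_loop.eq_def]
    simp [pvBits]
  | succ k ih =>
    intro m hlt
    by_cases htop : 2 ^ k ≤ m
    · -- top digit set: the loop peels (k, 2^k)
      have hp : (0:Nat) < 2 ^ k := Nat.pow_pos (by omega)
      have hdig : m / 2 ^ k = 1 := by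
        have h1 : 1 ≤ m / 2 ^ k := (Nat.le_div_iff_mul_le hp).mpr (by omega)
        have h2 : m / 2 ^ k < 2 := (Nat.div_lt_iff_lt_mul hp).mpr (by rw [← pow_succ']; exact hlt)
        omega
      have hbl : PySem.Int.bitLength ((m : Nat) : Int) = k + 1 := by
        apply bitLength_eq_of_bracket _ k <;> simp <;> omega
      have hpos : (0:Int) < ((m : Nat) : Int) := by exact_mod_cast Nat.pos_of_ne_zero (by omega)
      rw [peak_plan_py_loop.eq_def, dif_pos hpos]
      simp only [hbl, Nat.add_sub_cancel]
      simp only [pvBits, hdig]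
      congr 1
      · simp [Nat.one_shiftLeft]
      · have hsub : ((m : Nat) : Int) - (((1 <<< k : Nat)) : Int) = (((m - 2 ^ k : Nat)) : Int) := by
          rw [Nat.one_shiftLeft]; omega
        rw [hsub]
        simp only [List.append_eq, List.nil_append]
        rw [ih (m - 2 ^ k) (by omega)]
        apply pvBits_congr
        intro h hh
        have hd := div_mod_add_pow (m - 2 ^ k) k h hh
        rw [show 2 ^ k + (m - 2 ^ k) = m by omega] at hd
        exact hd.symm
    · -- top digit clear
      have hdig : m / 2 ^ k = 0 := Nat.div_eq_of_lt (by omega)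
      simp only [pvBits, hdig]
      rw [if_neg (by omega), List.nil_append]
      exact ih m (by omega)

-- one halving step of the normal form
theorem pvBits_halve : ∀ (k m : Nat),
    pvBits m (k + 1) =
      (pvBits (m / 2) k).map (fun p => (p.1 + 1, 2 * p.2)) ++
        (if m % 2 = 1 then [((0:Int), (1:Int))] else []) := by
  intro k
  induction k with
  | zero =>
    intro m
    simp [pvBits]
  | succ k ih =>
    intro m
    have hdd : m / 2 / 2 ^ k = m / 2 ^ (k + 1) := by
      rw [Nat.div_div_eq_div_mul, pow_succ']
    calc pvBits m (k + 1 + 1)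
        = (if m / 2 ^ (k+1) % 2 = 1 then [(((k+1 : Nat) : Int), ((2 ^ (k+1) : Nat) : Int))] else []) ++ pvBits m (k + 1) := rfl
      _ = _ := by
          rw [ih m]
          simp only [pvBits, ← hdd, List.map_append, ← List.append_assoc]
          congr 1
          by_cases hb : m / 2 / 2 ^ k % 2 = 1
          · rw [if_pos hb, if_pos hb]
            have h1 : ((k + 1 : Nat) : Int) = ((k : Nat) : Int) + 1 := by push_cast; ring
            have h2 : ((2 ^ (k + 1) : Nat) : Int) = 2 * ((2 ^ k : Nat) : Int) := by push_cast; ring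
            simp only [List.map_cons, List.map_nil, h1, h2]
          · simp [hb]

-- B's recursion computes exactly the set-bit list
theorem alt_eq_bits : ∀ (m : Nat), peak_plan_py_alt ((m : Nat) : Int) = pvBits m (PySem.Int.bitLength ((m : Nat) : Int)) := by
  intro m
  induction m using Nat.strong_induction_on with
  | _ m ih =>
    by_cases hz : m = 0
    · subst hz
      rw [peak_plan_py_alt.eq_def]
      simp [pvBits_zero]
    · have hpos : (0:Nat) < m := by omega
      rw [peak_plan_py_alt.eq_def]
      rw [dif_neg (by exact_mod_cast hz)]
      rw [if_neg (by omega)]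
      have hfd : PySem.Int.floordiv ((m : Nat) : Int) 2 = ((m / 2 : Nat) : Int) :=
        PySem.Int.floordiv_natCast m 2
      have hmd : PySem.Int.mod ((m : Nat) : Int) 2 = ((m % 2 : Nat) : Int) :=
        PySem.Int.mod_natCast m 2
      have hbl : PySem.Int.bitLength ((m : Nat) : Int) = PySem.Int.bitLength ((m / 2 : Nat) : Int) + 1 :=
        PySem.Int.bitLength_natCast hpos
      rw [hbl, pvBits_halve]
      simp only [hfd, hmd, ih (m / 2) (by omega)]
      by_cases ho : m % 2 = 1
      · rw [if_pos (by rw [ho]; decide), if_pos ho]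
      · rw [if_neg (by simp; omega), if_neg ho, List.append_nil]

-- ===== VERDICT (by name: the statement is the Claim_ definition above) =====
theorem peak_plan_py_spec : Claim_equal_peak_plan_py := by
  intro size _ hpre
  have h0 : 0 ≤ size := hpre
  have hm : size = ((size.toNat : Nat) : Int) := by omega
  unfold Spec_peak_plan_py peak_plan_py
  rw [if_neg (by omega), hm, alt_eq_bits]
  have hlt := PySem.Int.lt_two_pow_bitLength ((size.toNat : Nat) : Int)
  rw [Int.natAbs_natCast] at hlt
  exact loop_eq_bits (PySem.Int.bitLength ((size.toNat : Nat) : Int)) size.toNat hlt
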